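-- pv_equiv track=rewrite | github.com/mmaltsev/onti40 | server/datafetch.py | setPrefix
-- ===== SOURCE A (Python) =====
-- def setPrefix(value):
--     prefixes = {
--         'http://creativecommons.org/ns#': 'cc:',
--         'http://dbpedia.org/ontology#': 'dbo:',
--         'http://dbpedia.org/ontology/': 'dbo:',
--         'http://dbpedia.org/resource#': 'dbr:',
--         'http://dbpedia.org/resource/': 'dbr:',
--         'http://purl.org/spar/deo/': 'deo:',
--         'http://www.ontologydesignpatterns.org/ont/dul/DUL.owl#': 'dul:',
--         'http://www.geonames.org/ontology#': 'geo:',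
--         'http://www.w3.org/2002/07/owl#': 'owl:',
--         'http://www.w3.org/1999/02/22-rdf-syntax-ns#': 'rdf:',
--         'https://w3id.org/i40/sto#': 'sto:',
--         'http://www.w3.org/XML/1998/namespace': 'xml:',
--         'http://www.w3.org/2001/XMLSchema#': 'xsd:',
--         'http://purl.org/dc/elements/1.1/': 'dc11:',
--         'http://usefulinc.com/ns/doap#': 'doap:',
--         'http://xmlns.com/foaf/0.1/': 'foaf:',
--         'http://purl.org/muto/core#': 'muto:',
--         'https://w3id.org/i40/rami#': 'rami:',
--         'http://www.w3.org/2000/01/rdf-schema#': 'rdfs:',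
--         'http://www.w3.org/2004/02/skos/core#': 'skos:',
--         'http://purl.org/vocab/vann/': 'vann:',
--         'http://purl.org/vocommons/voaf#': 'voaf:',
--         'http://schema.org/': 'schema:',
--         'http://purl.org/dc/terms/': 'dcterms:',
--         'http://dbpedia.org/property/': 'dbprop:',
--         'http://dbpedia.org/class/yago/': 'dby:',
--         'http://www.w3.org/ns/prov#': 'nsprov:',
--         'http://purl.org/linguistics/gold/': 'lingg:',
--         'http://wikidata.dbpedia.org/resource/': 'wkdr:',
--         'http://www.wikidata.org/entity/': 'wkde:'
--     }
--     for prefix in prefixes: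
--         if prefix in value:
--             value = value.replace(prefix, prefixes[prefix])
--     return value
-- ===== SOURCE B (Python) =====
-- import re
--
-- PREFIXES = {
--     'http://creativecommons.org/ns#': 'cc:',
--     'http://dbpedia.org/ontology#': 'dbo:',
--     'http://dbpedia.org/ontology/': 'dbo:',
--     'http://dbpedia.org/resource#': 'dbr:',
--     'http://dbpedia.org/resource/': 'dbr:',
--     'http://purl.org/spar/deo/': 'deo:',
--     'http://www.ontologydesignpatterns.org/ont/dul/DUL.owl#': 'dul:',
--     'http://www.geonames.org/ontology#': 'geo:',
--     'http://www.w3.org/2002/07/owl#': 'owl:',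
--     'http://www.w3.org/1999/02/22-rdf-syntax-ns#': 'rdf:',
--     'https://w3id.org/i40/sto#': 'sto:',
--     'http://www.w3.org/XML/1998/namespace': 'xml:',
--     'http://www.w3.org/2001/XMLSchema#': 'xsd:',
--     'http://purl.org/dc/elements/1.1/': 'dc11:',
--     'http://usefulinc.com/ns/doap#': 'doap:',
--     'http://xmlns.com/foaf/0.1/': 'foaf:',
--     'http://purl.org/muto/core#': 'muto:',
--     'https://w3id.org/i40/rami#': 'rami:',
--     'http://www.w3.org/2000/01/rdf-schema#': 'rdfs:',
--     'http://www.w3.org/2004/02/skos/core#': 'skos:',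
--     'http://purl.org/vocab/vann/': 'vann:',
--     'http://purl.org/vocommons/voaf#': 'voaf:',
--     'http://schema.org/': 'schema:',
--     'http://purl.org/dc/terms/': 'dcterms:',
--     'http://dbpedia.org/property/': 'dbprop:',
--     'http://dbpedia.org/class/yago/': 'dby:',
--     'http://www.w3.org/ns/prov#': 'nsprov:',
--     'http://purl.org/linguistics/gold/': 'lingg:',
--     'http://wikidata.dbpedia.org/resource/': 'wkdr:',
--     'http://www.wikidata.org/entity/': 'wkde:'
-- }
--
-- # One compiled alternation of the escaped namespace literals, in dict-insertion
-- # order; a single left-to-right pass replaces every occurrence via a dict lookup.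
-- PATTERN = re.compile('|'.join(re.escape(p) for p in PREFIXES))
--
--
-- def setPrefix(value):
--     return PATTERN.sub(lambda m: PREFIXES[m.group(0)], value)
-- ===== Notes on version B (the rewrite author's own statement) =====
-- stated objective: idiomatic
-- what changed: Replaces A's 30 sequential full-string str.replace passes (one per namespace) with one precompiled regex alternation of the re.escape-d namespace literals, resolving all occurrences in a single left-to-right scan via re.sub with a dict lookup per match.
import Mathlib
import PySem

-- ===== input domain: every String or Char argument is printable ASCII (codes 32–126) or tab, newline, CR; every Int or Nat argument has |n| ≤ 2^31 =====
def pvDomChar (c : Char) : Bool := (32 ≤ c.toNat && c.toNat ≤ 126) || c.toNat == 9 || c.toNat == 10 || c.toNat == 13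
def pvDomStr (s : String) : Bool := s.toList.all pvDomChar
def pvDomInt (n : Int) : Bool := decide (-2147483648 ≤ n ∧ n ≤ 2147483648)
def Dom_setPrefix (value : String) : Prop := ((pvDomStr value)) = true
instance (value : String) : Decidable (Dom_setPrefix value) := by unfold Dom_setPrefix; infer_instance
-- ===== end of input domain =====

-- B replaces A's 30 sequential full-string replace passes by one left-to-right
-- scan with the compiled alternation of the namespaces (idiomatic single pass).

-- ===== PORT A =====
-- Python dict literal (distinct keys) ported as an association list in insertion
-- order; 'for prefix in prefixes' iterates it, 'prefixes[prefix]' is the paired value.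
def prefixesA : List (String × String) :=
  [("http://creativecommons.org/ns#", "cc:"),
   ("http://dbpedia.org/ontology#", "dbo:"),
   ("http://dbpedia.org/ontology/", "dbo:"),
   ("http://dbpedia.org/resource#", "dbr:"),
   ("http://dbpedia.org/resource/", "dbr:"),
   ("http://purl.org/spar/deo/", "deo:"),
   ("http://www.ontologydesignpatterns.org/ont/dul/DUL.owl#", "dul:"),
   ("http://www.geonames.org/ontology#", "geo:"),
   ("http://www.w3.org/2002/07/owl#", "owl:"),
   ("http://www.w3.org/1999/02/22-rdf-syntax-ns#", "rdf:"),
   ("https://w3id.org/i40/sto#", "sto:"),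
   ("http://www.w3.org/XML/1998/namespace", "xml:"),
   ("http://www.w3.org/2001/XMLSchema#", "xsd:"),
   ("http://purl.org/dc/elements/1.1/", "dc11:"),
   ("http://usefulinc.com/ns/doap#", "doap:"),
   ("http://xmlns.com/foaf/0.1/", "foaf:"),
   ("http://purl.org/muto/core#", "muto:"),
   ("https://w3id.org/i40/rami#", "rami:"),
   ("http://www.w3.org/2000/01/rdf-schema#", "rdfs:"),
   ("http://www.w3.org/2004/02/skos/core#", "skos:"),
   ("http://purl.org/vocab/vann/", "vann:"),
   ("http://purl.org/vocommons/voaf#", "voaf:"),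
   ("http://schema.org/", "schema:"),
   ("http://purl.org/dc/terms/", "dcterms:"),
   ("http://dbpedia.org/property/", "dbprop:"),
   ("http://dbpedia.org/class/yago/", "dby:"),
   ("http://www.w3.org/ns/prov#", "nsprov:"),
   ("http://purl.org/linguistics/gold/", "lingg:"),
   ("http://wikidata.dbpedia.org/resource/", "wkdr:"),
   ("http://www.wikidata.org/entity/", "wkde:")]

def setPrefix (value : String) : String :=
  prefixesA.foldl
    (fun v pr => if PySem.Str.isIn pr.1 v then PySem.Str.replace v pr.1 pr.2 else v)
    value

-- ===== PORT B =====
-- B's pattern is 'p1|p2|…|p30' where every alternative is an re.escape-d LITERAL,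
-- so re.sub is exactly this hand-ported scan: move left to right; at each position
-- try the alternatives in pattern (= insertion) order; on a match emit the mapped
-- replacement and jump past the match, otherwise copy one character. This port is
-- exact because escaped literal alternatives match only themselves.
def charPairs : List (List Char × List Char) :=
  [
   (['h', 't', 't', 'p', ':', '/', '/', 'c', 'r', 'e', 'a', 't', 'i', 'v', 'e', 'c', 'o', 'm', 'm', 'o', 'n', 's', '.', 'o', 'r', 'g', '/', 'n', 's', '#'],
    ['c', 'c', ':']),
   (['h', 't', 't', 'p', ':', '/', '/', 'd', 'b', 'p', 'e', 'd', 'i', 'a', '.', 'o', 'r', 'g', '/', 'o', 'n', 't', 'o', 'l', 'o', 'g', 'y', '#'],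
    ['d', 'b', 'o', ':']),
   (['h', 't', 't', 'p', ':', '/', '/', 'd', 'b', 'p', 'e', 'd', 'i', 'a', '.', 'o', 'r', 'g', '/', 'o', 'n', 't', 'o', 'l', 'o', 'g', 'y', '/'],
    ['d', 'b', 'o', ':']),
   (['h', 't', 't', 'p', ':', '/', '/', 'd', 'b', 'p', 'e', 'd', 'i', 'a', '.', 'o', 'r', 'g', '/', 'r', 'e', 's', 'o', 'u', 'r', 'c', 'e', '#'],
    ['d', 'b', 'r', ':']),
   (['h', 't', 't', 'p', ':', '/', '/', 'd', 'b', 'p', 'e', 'd', 'i', 'a', '.', 'o', 'r', 'g', '/', 'r', 'e', 's', 'o', 'u', 'r', 'c', 'e', '/'],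
    ['d', 'b', 'r', ':']),
   (['h', 't', 't', 'p', ':', '/', '/', 'p', 'u', 'r', 'l', '.', 'o', 'r', 'g', '/', 's', 'p', 'a', 'r', '/', 'd', 'e', 'o', '/'],
    ['d', 'e', 'o', ':']),
   (['h', 't', 't', 'p', ':', '/', '/', 'w', 'w', 'w', '.', 'o', 'n', 't', 'o', 'l', 'o', 'g', 'y', 'd', 'e', 's', 'i', 'g', 'n', 'p', 'a', 't', 't', 'e', 'r', 'n', 's', '.', 'o', 'r', 'g', '/', 'o', 'n', 't', '/', 'd', 'u', 'l', '/', 'D', 'U', 'L', '.', 'o', 'w', 'l', '#'],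
    ['d', 'u', 'l', ':']),
   (['h', 't', 't', 'p', ':', '/', '/', 'w', 'w', 'w', '.', 'g', 'e', 'o', 'n', 'a', 'm', 'e', 's', '.', 'o', 'r', 'g', '/', 'o', 'n', 't', 'o', 'l', 'o', 'g', 'y', '#'],
    ['g', 'e', 'o', ':']),
   (['h', 't', 't', 'p', ':', '/', '/', 'w', 'w', 'w', '.', 'w', '3', '.', 'o', 'r', 'g', '/', '2', '0', '0', '2', '/', '0', '7', '/', 'o', 'w', 'l', '#'],
    ['o', 'w', 'l', ':']),
   (['h', 't', 't', 'p', ':', '/', '/', 'w', 'w', 'w', '.', 'w', '3', '.', 'o', 'r', 'g', '/', '1', '9', '9', '9', '/', '0', '2', '/', '2', '2', '-', 'r', 'd', 'f', '-', 's', 'y', 'n', 't', 'a', 'x', '-', 'n', 's', '#'],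
    ['r', 'd', 'f', ':']),
   (['h', 't', 't', 'p', 's', ':', '/', '/', 'w', '3', 'i', 'd', '.', 'o', 'r', 'g', '/', 'i', '4', '0', '/', 's', 't', 'o', '#'],
    ['s', 't', 'o', ':']),
   (['h', 't', 't', 'p', ':', '/', '/', 'w', 'w', 'w', '.', 'w', '3', '.', 'o', 'r', 'g', '/', 'X', 'M', 'L', '/', '1', '9', '9', '8', '/', 'n', 'a', 'm', 'e', 's', 'p', 'a', 'c', 'e'],
    ['x', 'm', 'l', ':']),
   (['h', 't', 't', 'p', ':', '/', '/', 'w', 'w', 'w', '.', 'w', '3', '.', 'o', 'r', 'g', '/', '2', '0', '0', '1', '/', 'X', 'M', 'L', 'S', 'c', 'h', 'e', 'm', 'a', '#'],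
    ['x', 's', 'd', ':']),
   (['h', 't', 't', 'p', ':', '/', '/', 'p', 'u', 'r', 'l', '.', 'o', 'r', 'g', '/', 'd', 'c', '/', 'e', 'l', 'e', 'm', 'e', 'n', 't', 's', '/', '1', '.', '1', '/'],
    ['d', 'c', '1', '1', ':']),
   (['h', 't', 't', 'p', ':', '/', '/', 'u', 's', 'e', 'f', 'u', 'l', 'i', 'n', 'c', '.', 'c', 'o', 'm', '/', 'n', 's', '/', 'd', 'o', 'a', 'p', '#'],
    ['d', 'o', 'a', 'p', ':']),
   (['h', 't', 't', 'p', ':', '/', '/', 'x', 'm', 'l', 'n', 's', '.', 'c', 'o', 'm', '/', 'f', 'o', 'a', 'f', '/', '0', '.', '1', '/'],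
    ['f', 'o', 'a', 'f', ':']),
   (['h', 't', 't', 'p', ':', '/', '/', 'p', 'u', 'r', 'l', '.', 'o', 'r', 'g', '/', 'm', 'u', 't', 'o', '/', 'c', 'o', 'r', 'e', '#'],
    ['m', 'u', 't', 'o', ':']),
   (['h', 't', 't', 'p', 's', ':', '/', '/', 'w', '3', 'i', 'd', '.', 'o', 'r', 'g', '/', 'i', '4', '0', '/', 'r', 'a', 'm', 'i', '#'],
    ['r', 'a', 'm', 'i', ':']),
   (['h', 't', 't', 'p', ':', '/', '/', 'w', 'w', 'w', '.', 'w', '3', '.', 'o', 'r', 'g', '/', '2', '0', '0', '0', '/', '0', '1', '/', 'r', 'd', 'f', '-', 's', 'c', 'h', 'e', 'm', 'a', '#'],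
    ['r', 'd', 'f', 's', ':']),
   (['h', 't', 't', 'p', ':', '/', '/', 'w', 'w', 'w', '.', 'w', '3', '.', 'o', 'r', 'g', '/', '2', '0', '0', '4', '/', '0', '2', '/', 's', 'k', 'o', 's', '/', 'c', 'o', 'r', 'e', '#'],
    ['s', 'k', 'o', 's', ':']),
   (['h', 't', 't', 'p', ':', '/', '/', 'p', 'u', 'r', 'l', '.', 'o', 'r', 'g', '/', 'v', 'o', 'c', 'a', 'b', '/', 'v', 'a', 'n', 'n', '/'],
    ['v', 'a', 'n', 'n', ':']),
   (['h', 't', 't', 'p', ':', '/', '/', 'p', 'u', 'r', 'l', '.', 'o', 'r', 'g', '/', 'v', 'o', 'c', 'o', 'm', 'm', 'o', 'n', 's', '/', 'v', 'o', 'a', 'f', '#'],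
    ['v', 'o', 'a', 'f', ':']),
   (['h', 't', 't', 'p', ':', '/', '/', 's', 'c', 'h', 'e', 'm', 'a', '.', 'o', 'r', 'g', '/'],
    ['s', 'c', 'h', 'e', 'm', 'a', ':']),
   (['h', 't', 't', 'p', ':', '/', '/', 'p', 'u', 'r', 'l', '.', 'o', 'r', 'g', '/', 'd', 'c', '/', 't', 'e', 'r', 'm', 's', '/'],
    ['d', 'c', 't', 'e', 'r', 'm', 's', ':']),
   (['h', 't', 't', 'p', ':', '/', '/', 'd', 'b', 'p', 'e', 'd', 'i', 'a', '.', 'o', 'r', 'g', '/', 'p', 'r', 'o', 'p', 'e', 'r', 't', 'y', '/'],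
    ['d', 'b', 'p', 'r', 'o', 'p', ':']),
   (['h', 't', 't', 'p', ':', '/', '/', 'd', 'b', 'p', 'e', 'd', 'i', 'a', '.', 'o', 'r', 'g', '/', 'c', 'l', 'a', 's', 's', '/', 'y', 'a', 'g', 'o', '/'],
    ['d', 'b', 'y', ':']),
   (['h', 't', 't', 'p', ':', '/', '/', 'w', 'w', 'w', '.', 'w', '3', '.', 'o', 'r', 'g', '/', 'n', 's', '/', 'p', 'r', 'o', 'v', '#'],
    ['n', 's', 'p', 'r', 'o', 'v', ':']),
   (['h', 't', 't', 'p', ':', '/', '/', 'p', 'u', 'r', 'l', '.', 'o', 'r', 'g', '/', 'l', 'i', 'n', 'g', 'u', 'i', 's', 't', 'i', 'c', 's', '/', 'g', 'o', 'l', 'd', '/'],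
    ['l', 'i', 'n', 'g', 'g', ':']),
   (['h', 't', 't', 'p', ':', '/', '/', 'w', 'i', 'k', 'i', 'd', 'a', 't', 'a', '.', 'd', 'b', 'p', 'e', 'd', 'i', 'a', '.', 'o', 'r', 'g', '/', 'r', 'e', 's', 'o', 'u', 'r', 'c', 'e', '/'],
    ['w', 'k', 'd', 'r', ':']),
   (['h', 't', 't', 'p', ':', '/', '/', 'w', 'w', 'w', '.', 'w', 'i', 'k', 'i', 'd', 'a', 't', 'a', '.', 'o', 'r', 'g', '/', 'e', 'n', 't', 'i', 't', 'y', '/'],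
    ['w', 'k', 'd', 'e', ':'])
  ]

-- cited by scanChars's decreasing_by (every pattern alternative is nonempty)
theorem charPairs_fst_ne_nil : ∀ pr ∈ charPairs, pr.1 ≠ [] := by decide

def scanChars (cs : List Char) : List Char :=
  match cs with
  | [] => []
  | c :: t =>
    match hf : charPairs.find? (fun pr => pr.1.isPrefixOf (c :: t)) with
    | some pr => pr.2 ++ scanChars ((c :: t).drop pr.1.length)
    | none => c :: scanChars t
termination_by cs.length
decreasing_by
  · have hne := charPairs_fst_ne_nil _ (List.mem_of_find?_eq_some hf)
    have hlen : 0 < pr.1.length := List.length_pos_iff.mpr hne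
    simp only [List.length_drop, List.length_cons]
    omega
  · simp

def setPrefix_alt (value : String) : String :=
  String.ofList (scanChars value.toList)

-- ===== PRECONDITION & SPEC =====
def Spec_setPrefix (value : String) (out : String) : Prop := out = setPrefix_alt value
instance (value : String) (out : String) : Decidable (Spec_setPrefix value out) := by unfold Spec_setPrefix; infer_instance

-- ===== CLAIM (what is proved, stated in full; the proofs are below) =====
def Claim_equal_setPrefix : Prop := ∀ (value : String), Dom_setPrefix value → Spec_setPrefix value (setPrefix value)

-- ===== LEMMAS AND PROOFS =====

-- --- PySem.Chars.replace.go: accumulator and fuel normalisation ---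

theorem go_zero (old new l acc : List Char) :
    PySem.Chars.replace.go old new 0 l acc = acc.reverse ++ l := by
  rw [PySem.Chars.replace.go.eq_def]

theorem go_succ_nil (old new : List Char) (f : Nat) (acc : List Char) :
    PySem.Chars.replace.go old new (f + 1) [] acc = acc.reverse := by
  rw [PySem.Chars.replace.go.eq_def]

theorem go_succ_cons (old new : List Char) (f : Nat) (c : Char) (t acc : List Char) :
    PySem.Chars.replace.go old new (f + 1) (c :: t) acc
      = if old.isPrefixOf (c :: t) = true then
          PySem.Chars.replace.go old new f (List.drop old.length (c :: t)) (new.reverse ++ acc)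
        else
          PySem.Chars.replace.go old new f t (c :: acc) := by
  rw [PySem.Chars.replace.go.eq_def]

theorem go_acc (old new : List Char) :
    ∀ (fuel : Nat) (l acc : List Char),
      PySem.Chars.replace.go old new fuel l acc
        = acc.reverse ++ PySem.Chars.replace.go old new fuel l [] := by
  intro fuel
  induction fuel with
  | zero => intro l acc; rw [go_zero, go_zero]; simp
  | succ f ih =>
    intro l acc
    cases l with
    | nil => rw [go_succ_nil, go_succ_nil]; simp
    | cons c t =>
      rw [go_succ_cons, go_succ_cons]
      by_cases h : old.isPrefixOf (c :: t) = true
      · rw [if_pos h, if_pos h, ih _ (new.reverse ++ acc), ih _ (new.reverse ++ [])]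
        simp
      · rw [if_neg h, if_neg h, ih _ (c :: acc), ih _ (c :: [])]
        simp

theorem go_fuel (old new : List Char) (hold : old ≠ []) :
    ∀ (f1 f2 : Nat) (l : List Char), l.length ≤ f1 → l.length ≤ f2 →
      PySem.Chars.replace.go old new f1 l [] = PySem.Chars.replace.go old new f2 l [] := by
  intro f1
  induction f1 with
  | zero =>
    intro f2 l h1 h2
    have hl : l = [] := by cases l with | nil => rfl | cons a b => simp at h1
    subst hl
    cases f2 with
    | zero => rfl
    | succ f => rw [go_zero, go_succ_nil]; simp
  | succ f ih =>
    intro f2 l h1 h2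
    cases l with
    | nil =>
      cases f2 with
      | zero => rw [go_zero, go_succ_nil]; simp
      | succ f2' => rw [go_succ_nil, go_succ_nil]
    | cons c t =>
      have hol : 0 < old.length := List.length_pos_iff.mpr hold
      simp only [List.length_cons] at h1 h2
      cases f2 with
      | zero => omega
      | succ f2' =>
        rw [go_succ_cons, go_succ_cons]
        by_cases h : old.isPrefixOf (c :: t) = true
        · rw [if_pos h, if_pos h, go_acc, go_acc old new f2']
          congr 1
          apply ih
          · simp only [List.length_drop, List.length_cons]; omega
          · simp only [List.length_drop, List.length_cons]; omega
        · rw [if_neg h, if_neg h, go_acc, go_acc old new f2']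
          congr 1
          apply ih <;> omega

-- --- replace: the three structural equations ---

theorem replace_eq_go (old new s : List Char) (h : old ≠ []) :
    PySem.Chars.replace s old new = PySem.Chars.replace.go old new s.length s [] := by
  unfold PySem.Chars.replace
  rw [if_neg (by simp [List.isEmpty_iff, h])]

theorem replace_nil (old new : List Char) (h : old ≠ []) :
    PySem.Chars.replace [] old new = [] := by
  rw [replace_eq_go old new [] h]
  rw [show ([] : List Char).length = 0 from rfl, go_zero]
  simp

theorem replace_pos (old new s : List Char) (h : old ≠ []) (hp : old <+: s) :
    PySem.Chars.replace s old new
      = new ++ PySem.Chars.replace (s.drop old.length) old new := by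
  cases s with
  | nil => exact absurd (List.prefix_nil.mp hp) h
  | cons c t =>
    have hol : 0 < old.length := List.length_pos_iff.mpr h
    have hpre : old.isPrefixOf (c :: t) = true := List.isPrefixOf_iff_prefix.mpr hp
    rw [replace_eq_go old new _ h, replace_eq_go old new _ h]
    simp only [List.length_cons]
    rw [go_succ_cons, if_pos hpre, go_acc]
    simp only [List.append_nil, List.reverse_reverse]
    congr 1
    apply go_fuel old new h
    · simp only [List.length_drop, List.length_cons]; omega
    · exact le_rfl

theorem replace_cons_neg (old new : List Char) (c : Char) (t : List Char)
    (h : old ≠ []) (hp : ¬ old <+: (c :: t)) :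
    PySem.Chars.replace (c :: t) old new = c :: PySem.Chars.replace t old new := by
  have hpre : old.isPrefixOf (c :: t) = false := by
    rw [← Bool.not_eq_true]
    intro hb
    exact hp (List.isPrefixOf_iff_prefix.mp hb)
  rw [replace_eq_go old new _ h, replace_eq_go old new _ h]
  simp only [List.length_cons]
  rw [go_succ_cons, if_neg (by simp [hpre]), go_acc]
  simp

theorem replace_id (old new s : List Char) (h : old ≠ []) (hni : ¬ old <:+: s) :
    PySem.Chars.replace s old new = s := by
  induction s with
  | nil => exact replace_nil old new h
  | cons c t ih =>
    have h1 : ¬ old <+: (c :: t) := fun hp => hni hp.isInfix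
    rw [replace_cons_neg old new c t h h1, ih (fun hi => hni (List.infix_cons hi))]

-- --- the combinatorial side condition on pairs of strings ---

-- GoodFront x q: no nonempty suffix of x is prefix-comparable with q
def GoodFront (x q : List Char) : Prop :=
  ∀ k < x.length, ¬ (x.drop k <+: q) ∧ ¬ (q <+: x.drop k)

def httpL : List Char := ['h', 't', 't', 'p']
def scheme1 : List Char := ['h', 't', 't', 'p', ':', '/']
def scheme2 : List Char := ['h', 't', 't', 'p', 's', ':']
def eKey : List Char := ['h', 't', 't', 'p', ':', '/', '/', 'w', 'w', 'w', '.', 'w', '3', '.', 'o', 'r', 'g', '/', 'X', 'M', 'L', '/', '1', '9', '9', '8', '/', 'n', 'a', 'm', 'e', 's', 'p', 'a', 'c', 'e']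

-- pat occurs nowhere as a prefix of a suffix of x
def noOcc (pat : List Char) : List Char → Bool
  | [] => true
  | c :: t => (!(pat.isPrefixOf (c :: t))) && noOcc pat t

-- no suffix of x (including x itself) is a prefix of r
def noSufPre : List Char → List Char → Bool
  | [], _ => true
  | c :: t, r => (!((c :: t).isPrefixOf r)) && noSufPre t r

theorem noOcc_spec (pat : List Char) (hp : pat ≠ []) :
    ∀ (x : List Char), noOcc pat x = true → ∀ (k : Nat), ¬ (pat <+: x.drop k) := by
  intro x
  induction x with
  | nil => intro _ k h; rw [List.drop_nil] at h; exact hp (List.prefix_nil.mp h)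
  | cons c t ih =>
    intro hb k h
    simp only [noOcc, Bool.and_eq_true] at hb
    cases k with
    | zero =>
      rw [List.drop_zero] at h
      simp [List.isPrefixOf_iff_prefix.mpr h] at hb
    | succ k' => exact ih hb.2 k' (by simpa using h)

theorem noSufPre_spec : ∀ (x r : List Char), noSufPre x r = true →
    ∀ k < x.length, ¬ (x.drop k <+: r) := by
  intro x r
  induction x with
  | nil => intro _ k hk; simp at hk
  | cons c t ih =>
    intro hb k hk
    simp only [noSufPre, Bool.and_eq_true] at hb
    cases k with
    | zero =>
      rw [List.drop_zero]
      intro h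
      simp [List.isPrefixOf_iff_prefix.mpr h] at hb
    | succ k' =>
      have hk' : k' < t.length := by simpa using hk
      simpa using ih hb.2 k' hk'

theorem getLast?_drop_eq : ∀ (x : List Char) (j : Nat), j < x.length →
    (x.drop j).getLast? = x.getLast? := by
  intro x
  induction x with
  | nil => intro j hj; simp at hj
  | cons c t ih =>
    intro j hj
    cases j with
    | zero => rfl
    | succ j' =>
      have hj' : j' < t.length := by simpa using hj
      have ht : t ≠ [] := by intro he; rw [he] at hj'; simp at hj'
      rw [List.drop_succ_cons, ih j' hj']
      cases t with
      | nil => exact absurd rfl ht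
      | cons d t' => rw [List.getLast?_cons_cons]

theorem getLastD_mem (x : List Char) (d : Char) (h : x ≠ []) : x.getLastD d ∈ x := by
  rw [List.getLastD_eq_getLast?, List.getLast?_eq_some_getLast h, Option.getD_some]
  exact List.getLast_mem h

theorem head_of_http (q : List Char) (h : httpL <+: q) : q.headD ' ' = 'h' := by
  cases q with
  | nil => have := h.length_le; simp [httpL] at this
  | cons c t =>
    rw [List.headD_cons]
    exact ((List.cons_prefix_cons.mp h).1).symm

theorem ne_first (x q : List Char) (hx : x ≠ []) (hq : q ≠ [])
    (h : x.headD ' ' ≠ q.headD ' ') : ¬ (x <+: q) ∧ ¬ (q <+: x) := by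
  cases x with
  | nil => exact absurd rfl hx
  | cons a t =>
    cases q with
    | nil => exact absurd rfl hq
    | cons b s =>
      rw [List.headD_cons, List.headD_cons] at h
      exact ⟨fun hp => h (List.cons_prefix_cons.mp hp).1,
             fun hp => h ((List.cons_prefix_cons.mp hp).1).symm⟩

theorem frontDist (q new : List Char) (hq : q ≠ []) :
    ∀ (p v : List Char), (∀ k < p.length, ¬ (q <+: p.drop k ++ v)) →
      PySem.Chars.replace (p ++ v) q new = p ++ PySem.Chars.replace v q new := by
  intro p
  induction p with
  | nil => intro v _; simp
  | cons x p' ih =>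
    intro v hcond
    have h0 : ¬ q <+: (x :: (p' ++ v)) := by
      have := hcond 0 (by simp)
      simpa using this
    rw [List.cons_append, replace_cons_neg q new x (p' ++ v) hq h0,
      ih v (fun k hk => by
        have := hcond (k + 1) (by simp only [List.length_cons]; omega)
        simpa using this)]
    simp

theorem frontDist' (x q new v : List Char) (hq : q ≠ []) (hg : GoodFront x q) :
    PySem.Chars.replace (x ++ v) q new = x ++ PySem.Chars.replace v q new := by
  apply frontDist q new hq
  intro k hk hp
  rcases List.prefix_or_prefix_of_prefix hp (List.prefix_append (x.drop k) v) with h | h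
  · exact (hg k hk).2 h
  · exact (hg k hk).1 h

theorem noCreate (q p r : List Char) (hg : GoodFront q r) (hp : p ≠ []) :
    ∀ (t : List Char) (k : Nat), k < q.length →
      q.drop k <+: PySem.Chars.replace t p r → q.drop k <+: t := by
  intro t
  induction t with
  | nil =>
    intro k hk h
    rw [replace_nil p r hp] at h
    have hnil := List.prefix_nil.mp h
    rw [List.drop_eq_nil_iff] at hnil
    omega
  | cons c t' ih =>
    intro k hk h
    by_cases hpre : p <+: (c :: t')
    · rw [replace_pos p r _ hp hpre] at h
      rcases List.prefix_or_prefix_of_prefix h (List.prefix_append r _) with h1 | h1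
      · exact absurd h1 (hg k hk).1
      · exact absurd h1 (hg k hk).2
    · rw [replace_cons_neg p r c t' hp hpre] at h
      rw [List.drop_eq_getElem_cons hk] at h ⊢
      rw [List.cons_prefix_cons] at h
      obtain ⟨hch, h'⟩ := h
      by_cases hk1 : k + 1 < q.length
      · exact List.cons_prefix_cons.mpr ⟨hch, ih (k + 1) hk1 h'⟩
      · have hnil : q.drop (k + 1) = [] := List.drop_eq_nil_iff.mpr (by omega)
        rw [hnil]
        exact List.cons_prefix_cons.mpr ⟨hch, List.nil_prefix⟩

-- --- decidable facts about the 30 concrete pairs ---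

theorem fact_klen : ∀ pr ∈ charPairs,
    9 ≤ pr.1.length ∧ 3 ≤ pr.2.length ∧ pr.2.length ≤ 8 := by decide
theorem fact_http : ∀ pr ∈ charPairs, httpL.isPrefixOf pr.1 = true := by decide
theorem fact_noOcc_key : ∀ pr ∈ charPairs, noOcc httpL (pr.1.drop 1) = true := by decide
theorem fact_noOcc_val : ∀ pr ∈ charPairs, noOcc httpL (pr.2.drop 1) = true := by decide
theorem fact_last_key : ∀ pr ∈ charPairs,
    pr.1.getLastD ' ' = '#' ∨ pr.1.getLastD ' ' = '/' ∨ pr.1.getLastD ' ' = 'e' := by decide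
theorem fact_last_val : ∀ pr ∈ charPairs, pr.2.getLastD ' ' = ':' := by decide
theorem fact_vhead : ∀ pr ∈ charPairs, pr.2.headD ' ' ≠ 'h' := by decide
theorem fact_scheme : ∀ pr ∈ charPairs,
    ((pr.1.take 6 == scheme1) || (pr.1.take 6 == scheme2)) = true := by decide
theorem fact_vscheme : ∀ pr ∈ charPairs, ((List.range 6).all (fun k =>
    (!((scheme1.drop k).isPrefixOf pr.2)) && (!(pr.2.isPrefixOf (scheme1.drop k))) &&
    (!((scheme2.drop k).isPrefixOf pr.2)) && (!(pr.2.isPrefixOf (scheme2.drop k))))) = true := by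
  decide
theorem fact_colon : ∀ pr ∈ charPairs, ((pr.1.drop 6).all (fun c => !(c == ':'))) = true := by
  decide
theorem fact_vchars : ∀ pr ∈ charPairs,
    (pr.2.all (fun c => (!(c == '#')) && (!(c == '/')))) = true := by decide
theorem fact_elast : ∀ pr ∈ charPairs, pr.1.getLastD ' ' = 'e' → pr.1 = eKey := by decide
theorem fact_e : ∀ pr ∈ charPairs, noSufPre (eKey.drop 1) pr.2 = true := by decide

theorem fact_np : List.Pairwise
    (fun a b : List Char × List Char => ¬ (a.1 <+: b.1) ∧ ¬ (b.1 <+: a.1)) charPairs := by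
  have h : List.Pairwise (fun a b : List Char × List Char =>
      ((!(a.1.isPrefixOf b.1)) && (!(b.1.isPrefixOf a.1))) = true) charPairs := by decide
  refine h.imp ?_
  intro a b hab
  rw [Bool.and_eq_true] at hab
  constructor
  · intro hp; simp [List.isPrefixOf_iff_prefix.mpr hp] at hab
  · intro hp; simp [List.isPrefixOf_iff_prefix.mpr hp] at hab

theorem fact_len2 : ∀ pr ∈ charPairs, 2 ≤ pr.1.length := by
  intro pr h
  have := (fact_klen pr h).1
  omega

theorem fact_kne : ∀ pr ∈ charPairs, pr.1 ≠ [] := by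
  intro pr h hn
  have := (fact_klen pr h).1
  rw [hn] at this
  simp at this

theorem fact_vne : ∀ pr ∈ charPairs, pr.2 ≠ [] := by
  intro pr h hn
  have := (fact_klen pr h).2.1
  rw [hn] at this
  simp at this

theorem fact_http' : ∀ pr ∈ charPairs, httpL <+: pr.1 :=
  fun pr h => List.isPrefixOf_iff_prefix.mp (fact_http pr h)

theorem fact_scheme' : ∀ pr ∈ charPairs,
    pr.1.take 6 = scheme1 ∨ pr.1.take 6 = scheme2 := by
  intro pr h
  simpa using fact_scheme pr h

-- --- symbolic derivations of GoodFront from the facts ---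

theorem good_front_of (x q : List Char)
    (hq4 : httpL <+: q)
    (hocc : noOcc httpL (x.drop 1) = true)
    (hlast : x.getLastD ' ' ≠ 'h' ∧ x.getLastD ' ' ≠ 't' ∧ x.getLastD ' ' ≠ 'p')
    (h0a : ¬ (x <+: q)) (h0b : ¬ (q <+: x)) :
    GoodFront x q := by
  have hocc' := noOcc_spec httpL (by simp [httpL]) (x.drop 1) hocc
  intro k hk
  cases k with
  | zero => exact ⟨by simpa using h0a, by simpa using h0b⟩
  | succ k' =>
    have hdrop : x.drop (k' + 1) = (x.drop 1).drop k' := by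
      rw [List.drop_drop, Nat.add_comm]
    refine ⟨?_, ?_⟩
    · intro hpf
      rcases List.prefix_or_prefix_of_prefix hpf hq4 with h | h
      · have hne : x.drop (k' + 1) ≠ [] := by
          intro he; rw [List.drop_eq_nil_iff] at he; omega
        have hlq : (x.drop (k' + 1)).getLastD ' ' = x.getLastD ' ' := by
          rw [List.getLastD_eq_getLast?, List.getLastD_eq_getLast?,
            getLast?_drop_eq x (k' + 1) hk]
        have hmem : x.getLastD ' ' ∈ httpL := by
          rw [← hlq]
          exact h.subset (getLastD_mem _ _ hne)
        obtain ⟨ha, hb, hc⟩ := hlast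
        simp only [httpL, List.mem_cons, List.not_mem_nil, or_false] at hmem
        rcases hmem with h1 | h1 | h1 | h1
        exacts [ha h1, hb h1, hb h1, hc h1]
      · rw [hdrop] at h
        exact hocc' k' h
    · intro hpf
      have h4 := hq4.trans hpf
      rw [hdrop] at h4
      exact hocc' k' h4

theorem clause_a (q r : List Char)
    (hklen : 9 ≤ q.length)
    (hsch : q.take 6 = scheme1 ∨ q.take 6 = scheme2)
    (hcolon : ((q.drop 6).all (fun c => !(c == ':'))) = true)
    (hrne : r ≠ [])
    (hrlast : r.getLastD ' ' = ':')
    (hvs : ((List.range 6).all (fun k =>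
      (!((scheme1.drop k).isPrefixOf r)) && (!(r.isPrefixOf (scheme1.drop k))) &&
      (!((scheme2.drop k).isPrefixOf r)) && (!(r.isPrefixOf (scheme2.drop k))))) = true) :
    ∀ k < q.length, ¬ (r <+: q.drop k) := by
  intro k hk hpf
  by_cases hk6 : 6 ≤ k
  · have hc : ':' ∈ q.drop k := hpf.subset (by rw [← hrlast]; exact getLastD_mem _ _ hrne)
    have heq : q.drop k = (q.drop 6).drop (k - 6) := by
      rw [List.drop_drop]; congr 1; omega
    rw [heq] at hc
    have hc6 : ':' ∈ q.drop 6 := List.mem_of_mem_drop hc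
    have := List.all_eq_true.mp hcolon _ hc6
    simp at this
  · push_neg at hk6
    have hvsk := List.all_eq_true.mp hvs k (List.mem_range.mpr hk6)
    have hpre6 : ∀ s : List Char, q.take 6 = s → s.drop k <+: q.drop k := by
      intro s hs
      obtain ⟨t6, ht6⟩ := List.take_prefix 6 q
      refine ⟨t6, ?_⟩
      rw [← hs, ← List.drop_append_of_le_length (by rw [List.length_take]; omega), ht6]
    rcases hsch with hs | hs
    · rcases List.prefix_or_prefix_of_prefix hpf (hpre6 _ hs) with hcmp | hcmp
      · simp [List.isPrefixOf_iff_prefix.mpr hcmp] at hvsk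
      · simp [List.isPrefixOf_iff_prefix.mpr hcmp] at hvsk
    · rcases List.prefix_or_prefix_of_prefix hpf (hpre6 _ hs) with hcmp | hcmp
      · simp [List.isPrefixOf_iff_prefix.mpr hcmp] at hvsk
      · simp [List.isPrefixOf_iff_prefix.mpr hcmp] at hvsk

theorem clause_b (q r : List Char)
    (hql : q.getLastD ' ' = '#' ∨ q.getLastD ' ' = '/')
    (hvch : (r.all (fun c => (!(c == '#')) && (!(c == '/')))) = true) :
    ∀ k < q.length, ¬ (q.drop k <+: r) := by
  intro k hk hpf
  have hne : q.drop k ≠ [] := by intro he; rw [List.drop_eq_nil_iff] at he; omega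
  have hlq : (q.drop k).getLastD ' ' = q.getLastD ' ' := by
    rw [List.getLastD_eq_getLast?, List.getLastD_eq_getLast?, getLast?_drop_eq q k hk]
  have hmem : q.getLastD ' ' ∈ r := by
    rw [← hlq]
    exact hpf.subset (getLastD_mem _ _ hne)
  have hx := List.all_eq_true.mp hvch _ hmem
  rcases hql with h | h <;> rw [h] at hx <;> simp at hx

theorem good_key_key' (pr qs : List Char × List Char)
    (hpr : pr ∈ charPairs) (hqs : qs ∈ charPairs)
    (h0a : ¬ (pr.1 <+: qs.1)) (h0b : ¬ (qs.1 <+: pr.1)) : GoodFront pr.1 qs.1 := by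
  refine good_front_of pr.1 qs.1 (fact_http' qs hqs) (fact_noOcc_key pr hpr) ?_ h0a h0b
  rcases fact_last_key pr hpr with h | h | h <;>
    exact ⟨by rw [h]; decide, by rw [h]; decide, by rw [h]; decide⟩

theorem good_val_key : ∀ pr ∈ charPairs, ∀ qs ∈ charPairs, GoodFront pr.2 qs.1 := by
  intro pr hpr qs hqs
  have hq4 : httpL <+: qs.1 := fact_http' qs hqs
  have hhead : pr.2.headD ' ' ≠ qs.1.headD ' ' := by
    rw [head_of_http qs.1 hq4]
    exact fact_vhead pr hpr
  obtain ⟨h0a, h0b⟩ := ne_first pr.2 qs.1 (fact_vne pr hpr) (fact_kne qs hqs) hhead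
  refine good_front_of pr.2 qs.1 hq4 (fact_noOcc_val pr hpr) ?_ h0a h0b
  have h := fact_last_val pr hpr
  exact ⟨by rw [h]; decide, by rw [h]; decide, by rw [h]; decide⟩

theorem good_key_val : ∀ qs ∈ charPairs, ∀ pr ∈ charPairs, GoodFront qs.1 pr.2 := by
  intro qs hqs pr hpr
  intro k hk
  refine ⟨?_, clause_a qs.1 pr.2 (fact_klen qs hqs).1 (fact_scheme' qs hqs)
    (fact_colon qs hqs) (fact_vne pr hpr) (fact_last_val pr hpr) (fact_vscheme pr hpr) k hk⟩
  rcases fact_last_key qs hqs with h | h | h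
  · exact clause_b qs.1 pr.2 (Or.inl h) (fact_vchars pr hpr) k hk
  · exact clause_b qs.1 pr.2 (Or.inr h) (fact_vchars pr hpr) k hk
  · have hq : qs.1 = eKey := fact_elast qs hqs h
    rw [hq] at hk ⊢
    cases k with
    | zero =>
      intro hpf
      rw [List.drop_zero] at hpf
      have hle := hpf.length_le
      have hrlen := (fact_klen pr hpr).2.2
      have : eKey.length = 36 := by decide
      omega
    | succ k' =>
      have hdr : eKey.drop (k' + 1) = (eKey.drop 1).drop k' := by
        rw [List.drop_drop, Nat.add_comm]
      rw [hdr]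
      apply noSufPre_spec (eKey.drop 1) pr.2 (fact_e pr hpr) k'
      simp only [List.length_drop]
      omega

-- --- the fold of A at the character level ---

def stepR (v : List Char) (pr : List Char × List Char) : List Char :=
  PySem.Chars.replace v pr.1 pr.2

theorem foldA_toList (value : String) :
    (setPrefix value).toList = charPairs.foldl stepR value.toList := by
  have h : ∀ (L : List (String × String)) (v : String),
      (L.foldl (fun v pr => if PySem.Str.isIn pr.1 v then PySem.Str.replace v pr.1 pr.2 else v) v).toList
        = (L.map (fun pr => (pr.1.toList, pr.2.toList))).foldl stepR v.toList := by
    intro L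
    induction L with
    | nil => intro v; rfl
    | cons pr L' ih =>
      intro v
      simp only [List.foldl_cons, List.map_cons]
      rw [ih]
      congr 1
      by_cases hin : PySem.Str.isIn pr.1 v = true
      · rw [if_pos hin, PySem.Str.toList_replace]
        rfl
      · rw [if_neg hin]
        have hfalse : PySem.Chars.isIn pr.1.toList v.toList = false := by
          rw [← PySem.Str.isIn_eq]
          exact (Bool.not_eq_true _).mp hin
        have hinfix := (PySem.Chars.isIn_eq_false_iff _ _).mp hfalse
        have hne : pr.1.toList ≠ [] := by
          intro hnil
          rw [hnil, PySem.Chars.isIn_nil] at hfalse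
          simp at hfalse
        exact (replace_id _ _ _ hne hinfix).symm
  have hcp : charPairs = prefixesA.map (fun pr => (pr.1.toList, pr.2.toList)) := by decide
  rw [hcp]
  simp only [setPrefix]
  exact h prefixesA value

theorem fold_nil : ∀ (L : List (List Char × List Char)), (∀ pr ∈ L, pr.1 ≠ []) →
    L.foldl stepR [] = [] := by
  intro L
  induction L with
  | nil => intro _; rfl
  | cons pr L' ih =>
    intro h
    simp only [List.foldl_cons]
    rw [show stepR [] pr = [] from replace_nil _ _ (h pr (by simp))]
    exact ih (fun x hx => h x (by simp [hx]))

theorem fold_front : ∀ (L : List (List Char × List Char)) (front w : List Char),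
    (∀ pr ∈ L, pr.1 ≠ [] ∧ GoodFront front pr.1) →
    L.foldl stepR (front ++ w) = front ++ L.foldl stepR w := by
  intro L
  induction L with
  | nil => intro front w _; rfl
  | cons pr L' ih =>
    intro front w h
    simp only [List.foldl_cons]
    rw [show stepR (front ++ w) pr = front ++ stepR w pr from
      frontDist' front pr.1 pr.2 w (h pr (by simp)).1 (h pr (by simp)).2]
    exact ih front (stepR w pr) (fun x hx => h x (by simp [hx]))

theorem fold_cons (c : Char) : ∀ (L : List (List Char × List Char)) (w : List Char),
    (∀ pr ∈ L, pr ∈ charPairs) → (∀ pr ∈ charPairs, ¬ (pr.1 <+: c :: w)) →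
    L.foldl stepR (c :: w) = c :: L.foldl stepR w ∧
      (∀ pr ∈ charPairs, ¬ (pr.1 <+: c :: L.foldl stepR w)) := by
  intro L
  induction L with
  | nil => intro w _ hinv; exact ⟨rfl, hinv⟩
  | cons pr L' ih =>
    intro w hsub hinv
    have hmem : pr ∈ charPairs := hsub pr (by simp)
    have hpne : pr.1 ≠ [] := fact_kne pr hmem
    have hstep : stepR (c :: w) pr = c :: stepR w pr :=
      replace_cons_neg pr.1 pr.2 c w hpne (hinv pr hmem)
    have hinv' : ∀ qs ∈ charPairs, ¬ (qs.1 <+: c :: stepR w pr) := by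
      intro qs hqs hp
      have hq2 : 2 ≤ qs.1.length := fact_len2 qs hqs
      have hx : qs.1 = qs.1[0] :: qs.1.drop 1 := by
        simpa using List.drop_eq_getElem_cons (l := qs.1) (i := 0) (by omega)
      rw [hx, List.cons_prefix_cons] at hp
      obtain ⟨hch, h1⟩ := hp
      have h2 : qs.1.drop 1 <+: w :=
        noCreate qs.1 pr.1 pr.2 (good_key_val qs hqs pr hmem) hpne w 1 (by omega) h1
      exact hinv qs hqs (by rw [hx]; exact List.cons_prefix_cons.mpr ⟨hch, h2⟩)
    obtain ⟨e1, e2⟩ := ih (stepR w pr) (fun x hx => hsub x (by simp [hx])) hinv'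
    refine ⟨?_, ?_⟩
    · simp only [List.foldl_cons]
      rw [hstep, e1]
    · simp only [List.foldl_cons]
      exact e2

-- --- unfolding scanChars ---

theorem scan_nil : scanChars [] = [] := by
  rw [scanChars.eq_def]

theorem scan_some (c : Char) (t p r : List Char)
    (hf : charPairs.find? (fun pr => pr.1.isPrefixOf (c :: t)) = some (p, r)) :
    scanChars (c :: t) = r ++ scanChars ((c :: t).drop p.length) := by
  rw [scanChars.eq_def]
  split
  · rename_i heq
    simp at heq
  · rename_i cs' c' t' heq
    injection heq with h1 h2
    subst h1
    subst h2
    split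
    · rename_i pr' heq2
      rw [hf] at heq2
      injection heq2 with heq'
      rw [← heq']
    · rename_i heq2
      rw [hf] at heq2
      exact absurd heq2 (by simp)

theorem scan_none (c : Char) (t : List Char)
    (hf : charPairs.find? (fun pr => pr.1.isPrefixOf (c :: t)) = none) :
    scanChars (c :: t) = c :: scanChars t := by
  rw [scanChars.eq_def]
  split
  · rename_i heq
    simp at heq
  · rename_i cs' c' t' heq
    injection heq with h1 h2
    subst h1
    subst h2
    split
    · rename_i pr' heq2
      rw [hf] at heq2
      exact absurd heq2 (by simp)
    · rfl

-- --- main induction: A's fold equals B's scan ---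

theorem fold_eq_scan : ∀ (n : Nat) (cs : List Char), cs.length ≤ n →
    charPairs.foldl stepR cs = scanChars cs := by
  intro n
  induction n with
  | zero =>
    intro cs h
    have hnil : cs = [] := by
      cases cs with
      | nil => rfl
      | cons a b => simp at h
    subst hnil
    rw [fold_nil charPairs fact_kne, scan_nil]
  | succ n ih =>
    intro cs hle
    cases cs with
    | nil => rw [fold_nil charPairs fact_kne, scan_nil]
    | cons c t =>
      cases hf : charPairs.find? (fun pr => pr.1.isPrefixOf (c :: t)) with
      | none =>
        have hall : ∀ pr ∈ charPairs, ¬ (pr.1 <+: c :: t) := by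
          intro pr h hp
          exact List.find?_eq_none.mp hf pr h (List.isPrefixOf_iff_prefix.mpr hp)
        obtain ⟨e1, _⟩ := fold_cons c charPairs t (fun pr h => h) hall
        rw [e1, scan_none c t hf, ih t (by simp only [List.length_cons] at hle; omega)]
      | some pq =>
        obtain ⟨p, r⟩ := pq
        have hmem : (p, r) ∈ charPairs := List.mem_of_find?_eq_some hf
        have hfs := List.find?_some hf
        have hppre : p <+: (c :: t) := List.isPrefixOf_iff_prefix.mp hfs
        have hpne : p ≠ [] := fact_kne (p, r) hmem
        have hpl : 0 < p.length := List.length_pos_iff.mpr hpne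
        obtain ⟨u, hu⟩ := hppre
        rcases List.find?_eq_some_iff_append.mp hf with ⟨_, A, B, hsplit, hA⟩
        have hgoodA : ∀ qs ∈ A, qs.1 ≠ [] ∧ GoodFront p qs.1 := by
          intro qs hqs
          have hqsmem : qs ∈ charPairs := by
            rw [hsplit]; exact List.mem_append.mpr (Or.inl hqs)
          refine ⟨fact_kne qs hqsmem, ?_⟩
          have hpw := (List.pairwise_append.mp (by rw [← hsplit]; exact fact_np)).2.2
          have hR := hpw qs hqs (p, r) (by simp)
          exact good_key_key' (p, r) qs hmem hqsmem hR.2 hR.1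
        have hgoodB : ∀ qs ∈ B, qs.1 ≠ [] ∧ GoodFront r qs.1 := by
          intro qs hqs
          have hqsmem : qs ∈ charPairs := by
            rw [hsplit]
            exact List.mem_append.mpr (Or.inr (List.mem_cons_of_mem _ hqs))
          exact ⟨fact_kne qs hqsmem, good_val_key (p, r) hmem qs hqsmem⟩
        have hulen : u.length ≤ n := by
          have hlen : p.length + u.length = t.length + 1 := by
            rw [← List.length_append, hu]
            simp
          simp only [List.length_cons] at hle
          omega
        have hdrop : (c :: t).drop p.length = u := by
          rw [← hu, List.drop_left]
        rw [scan_some c t p r hf, hdrop, ← ih u hulen]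
        rw [show c :: t = p ++ u from hu.symm, hsplit]
        rw [List.foldl_append, List.foldl_cons, List.foldl_append, List.foldl_cons]
        rw [fold_front A p u hgoodA]
        rw [show stepR (p ++ A.foldl stepR u) (p, r)
            = r ++ PySem.Chars.replace (A.foldl stepR u) p r from by
          show PySem.Chars.replace (p ++ A.foldl stepR u) p r = _
          rw [replace_pos p r _ hpne (List.prefix_append p _), List.drop_left]]
        rw [fold_front B r _ hgoodB]
        rfl

-- ===== VERDICT (by name: the statement is the Claim_ definition above) =====
theorem setPrefix_spec : Claim_equal_setPrefix := by
  intro value _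
  unfold Spec_setPrefix
  rw [← String.toList_inj, foldA_toList,
    fold_eq_scan value.toList.length value.toList le_rfl]
  simp [setPrefix_alt]
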